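-- pv_equiv track=rewrite | github.com/Lfg2st/AdventOfCode_EdmundCloudsley | day_8/day_8_part2.py | tower_coord_finder
-- ===== SOURCE A (Python) =====
-- def tower_coord_finder(mat):
--     """
--     Finds unique non-dot characters and their coordinates in a 2D matrix.
--
--     Args:
--         mat (list of list of str): The 2D matrix to analyze.
--
--     Returns:
--         tuple: A list of all coordinates where a tower exists (excluding '.'),
--                and a dictionary mapping each unique tower character to a list of its coordinates.
--     """
--     tower_coords_list = []
--     tower_coords = {}
--     unique_towers = []
--
--     for idx_row, row in enumerate(mat):
--         for idx_col, item in enumerate(row):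
--             if item != '.':
--                 tower_coords_list.append((idx_row, idx_col))
--                 if item not in unique_towers:
--                     unique_towers.append(item)
--                     tower_coords[item] = [(idx_row, idx_col)]
--                 else:
--                     tower_coords[item].append((idx_row, idx_col))
--
--     return tower_coords_list, tower_coords
-- ===== SOURCE B (Python) =====
-- def tower_coord_finder(mat):
--     # Flatten once to (char, coord) pairs; then one filter pass PER distinct
--     # character (outer loop over characters, not over cells).  Row-major order
--     # of the flat list makes every per-char filter reproduce A's coord order,
--     # and dict.fromkeys keeps first-encounter key order.
--     cells = [(item, (r, c)) for r, row in enumerate(mat)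
--              for c, item in enumerate(row) if item != '.']
--     chars = list(dict.fromkeys(ch for ch, _ in cells))
--     groups = {ch: [rc for c2, rc in cells if c2 == ch] for ch in chars}
--     return [rc for _, rc in cells], groups
-- ===== Notes on version B (the rewrite author's own statement) =====
-- stated objective: alternative
-- what changed: A does one fused nested pass that grows the dict incrementally per cell (with an explicit unique_towers membership list); B flattens the grid once into (char, coord) pairs, dedups the characters, and then builds each group by a separate filter pass over the flat list per distinct character - grouping by repeated selection instead of incremental insertion.
import Mathlib
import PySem

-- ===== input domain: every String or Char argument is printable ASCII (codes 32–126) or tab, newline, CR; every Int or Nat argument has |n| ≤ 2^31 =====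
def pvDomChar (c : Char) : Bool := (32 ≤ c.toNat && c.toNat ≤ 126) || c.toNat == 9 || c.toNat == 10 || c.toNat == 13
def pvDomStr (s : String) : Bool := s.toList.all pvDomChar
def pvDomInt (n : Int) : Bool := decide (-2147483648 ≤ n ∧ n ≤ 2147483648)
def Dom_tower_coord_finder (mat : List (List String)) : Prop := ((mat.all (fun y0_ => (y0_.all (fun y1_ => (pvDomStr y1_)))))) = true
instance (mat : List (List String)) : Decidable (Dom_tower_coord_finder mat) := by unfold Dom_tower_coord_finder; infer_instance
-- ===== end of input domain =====

-- B replaces A's fused incremental grouping pass by: flatten the grid once, dedup the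
-- characters, then one filter pass over the flat list per distinct character (alternative
-- decomposition, same result).

-- ===== PORT A =====
def tower_coord_finder (mat : List (List String)) : (List (Int × Int)) × (List (String × List (Int × Int))) :=
  let st := (PySem.List.enumerate mat).foldl (fun st rr =>
      (PySem.List.enumerate rr.2).foldl (fun st ci =>
        if ci.2 ≠ "." then
          let lst := st.1 ++ [(rr.1, ci.1)]
          if ci.2 ∉ st.2.2 then
            (lst, st.2.1.insert ci.2 [(rr.1, ci.1)], st.2.2 ++ [ci.2])
          else
            (lst, st.2.1.modify ci.2 [] (fun v => v ++ [(rr.1, ci.1)]), st.2.2)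
        else st) st)
    (([] : List (Int × Int)), (PySem.Dict.empty : PySem.Dict String (List (Int × Int))), ([] : List String))
  (st.1, st.2.1.items)

-- ===== PORT B =====
def tower_coord_finder_alt (mat : List (List String)) : (List (Int × Int)) × (List (String × List (Int × Int))) :=
  let cells := (PySem.List.enumerate mat).flatMap (fun rr =>
      ((PySem.List.enumerate rr.2).filter (fun ci => ci.2 ≠ ".")).map (fun ci => (ci.2, (rr.1, ci.1))))
  let chars := PySem.List.dedup (cells.map (·.1))        -- list(dict.fromkeys(...))
  let groups := chars.foldl (fun d ch =>
      d.insert ch ((cells.filter (fun p => p.1 == ch)).map (·.2)))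
    (PySem.Dict.empty : PySem.Dict String (List (Int × Int)))
  (cells.map (·.2), groups.items)

-- ===== PRECONDITION & SPEC =====
def Spec_tower_coord_finder (mat : List (List String)) (out : (List (Int × Int)) × (List (String × List (Int × Int)))) : Prop := out = tower_coord_finder_alt mat
instance (mat : List (List String)) (out : (List (Int × Int)) × (List (String × List (Int × Int)))) : Decidable (Spec_tower_coord_finder mat out) := by unfold Spec_tower_coord_finder; infer_instance

-- ===== CLAIM (what is proved, stated in full; the proofs are below) =====
def Claim_equal_tower_coord_finder : Prop := ∀ (mat : List (List String)), Dom_tower_coord_finder mat → Spec_tower_coord_finder mat (tower_coord_finder mat)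

-- ===== LEMMAS AND PROOFS =====

-- A's per-tower step (after stripping the '.'-skip) and the grouping step it amounts to.
def pvStepA (st : (List (Int × Int)) × PySem.Dict String (List (Int × Int)) × List String)
    (p : String × (Int × Int)) :
    (List (Int × Int)) × PySem.Dict String (List (Int × Int)) × List String :=
  let lst := st.1 ++ [p.2]
  if p.1 ∉ st.2.2 then
    (lst, st.2.1.insert p.1 [p.2], st.2.2 ++ [p.1])
  else
    (lst, st.2.1.modify p.1 [] (fun v => v ++ [p.2]), st.2.2)

def pvStepB (d : PySem.Dict String (List (Int × Int))) (p : String × (Int × Int)) :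
    PySem.Dict String (List (Int × Int)) :=
  d.modify p.1 [] (fun v => v ++ [p.2])

-- invariant: if A's unique_towers component equals the dict's key list, the fused fold
-- decomposes into "append all coords" and "fold the grouping step".
theorem pv_main (ts : List (String × (Int × Int))) :
    ∀ (l : List (Int × Int)) (d : PySem.Dict String (List (Int × Int))),
    ts.foldl pvStepA (l, d, d.keys)
      = (l ++ ts.map (·.2), ts.foldl pvStepB d, (ts.foldl pvStepB d).keys) := by
  induction ts with
  | nil => intro l d; simp
  | cons p ts ih =>
    intro l d
    by_cases hc : p.1 ∈ d.keys
    · have hcb : d.contains p.1 = true := (PySem.Dict.contains_iff_mem_keys d p.1).2 hc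
      have hkeys : (pvStepB d p).keys = d.keys := by
        simp [pvStepB, PySem.Dict.modify, PySem.Dict.keys_insert_of_contains _ _ hcb]
      calc (p :: ts).foldl pvStepA (l, d, d.keys)
          = ts.foldl pvStepA (l ++ [p.2], pvStepB d p, (pvStepB d p).keys) := by
            simp [pvStepA, pvStepB, PySem.Dict.modify, hc,
              PySem.Dict.keys_insert_of_contains _ _ hcb]
        _ = _ := by rw [ih]; simp
    · have hcb : d.contains p.1 = false := by
        rw [← Bool.not_eq_true, PySem.Dict.contains_iff_mem_keys]; exact hc
      have hins : d.insert p.1 [p.2] = pvStepB d p := by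
        simp [pvStepB, PySem.Dict.modify, PySem.Dict.getD_of_not_contains _ _ hcb]
      have hkeys : (pvStepB d p).keys = d.keys ++ [p.1] := by
        rw [← hins]; exact PySem.Dict.keys_insert_of_not_contains _ _ hcb
      calc (p :: ts).foldl pvStepA (l, d, d.keys)
          = ts.foldl pvStepA (l ++ [p.2], pvStepB d p, (pvStepB d p).keys) := by
            simp [pvStepA, hc, hins, hkeys]
        _ = _ := by rw [ih]; simp

-- A's grouping dict and B's per-character rebuild have the same items list.
theorem pv_items (cells : List (String × (Int × Int))) :
    (cells.foldl pvStepB (PySem.Dict.empty : PySem.Dict String (List (Int × Int)))).items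
      = ((PySem.List.dedup (cells.map (·.1))).foldl (fun d ch =>
          d.insert ch ((cells.filter (fun p => p.1 == ch)).map (·.2)))
          (PySem.Dict.empty : PySem.Dict String (List (Int × Int)))).items := by
  have hkeysA : (cells.foldl pvStepB (PySem.Dict.empty : PySem.Dict String (List (Int × Int)))).keys
      = PySem.List.dedup (cells.map (·.1)) := by
    unfold pvStepB
    rw [PySem.Dict.keys_foldl_modify_key]
    simp [PySem.Set.update, PySem.Set.ofList_eq_foldl]
  have hnodupA : (cells.foldl pvStepB (PySem.Dict.empty : PySem.Dict String (List (Int × Int)))).keys.Nodup := by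
    rw [hkeysA]; exact PySem.List.nodup_dedup _
  have hB := PySem.Dict.items_foldl_insert_fresh
      (l := PySem.List.dedup (cells.map (·.1))) (k := fun ch => ch)
      (v := fun ch => (cells.filter (fun p => p.1 == ch)).map (·.2))
      (d := (PySem.Dict.empty : PySem.Dict String (List (Int × Int))))
      (by intro a _; exact PySem.Dict.contains_empty a)
      (by simp)
  beta_reduce at hB
  rw [PySem.Dict.items_eq_map_keys _ hnodupA ([] : List (Int × Int)), hkeysA, hB]
  simp only [PySem.Dict.empty, List.nil_append]
  apply List.map_congr_left
  intro ch _
  unfold pvStepB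
  rw [PySem.Dict.getD_foldl_modify_append]
  rfl

-- ===== VERDICT (by name: the statement is the Claim_ definition above) =====
theorem tower_coord_finder_spec : Claim_equal_tower_coord_finder := by
  intro mat _
  unfold Spec_tower_coord_finder tower_coord_finder tower_coord_finder_alt
  -- flatten A's nested fold into a fold over all (char, coord) cells, then filter out dots
  have hA : ∀ (rows : List (Int × List String)) st,
      rows.foldl (fun st rr =>
        (PySem.List.enumerate rr.2).foldl (fun st ci =>
          if ci.2 ≠ "." then pvStepA st (ci.2, (rr.1, ci.1)) else st) st) st
      = (rows.flatMap (fun rr =>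
          ((PySem.List.enumerate rr.2).filter (fun ci => ci.2 ≠ ".")).map
            (fun ci => (ci.2, (rr.1, ci.1))))).foldl pvStepA st := by
    intro rows st
    rw [List.foldl_flatMap]
    have hfun : (fun (st : (List (Int × Int)) × PySem.Dict String (List (Int × Int)) × List String) rr =>
        List.foldl pvStepA st
          (((PySem.List.enumerate rr.2).filter (fun ci => ci.2 ≠ ".")).map
            (fun ci => (ci.2, (rr.1, ci.1)))))
        = (fun (st : (List (Int × Int)) × PySem.Dict String (List (Int × Int)) × List String) (rr : Int × List String) =>
        (PySem.List.enumerate rr.2).foldl (fun st ci =>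
          if ci.2 ≠ "." then pvStepA st (ci.2, (rr.1, ci.1)) else st) st) := by
      funext st rr
      rw [List.foldl_map, List.foldl_filter]
      congr 1
      funext x y
      by_cases h : y.2 = "." <;> simp [h]
    rw [hfun]
  have := hA (PySem.List.enumerate mat)
    (([] : List (Int × Int)), (PySem.Dict.empty : PySem.Dict String (List (Int × Int))), ([] : List String))
  simp only [pvStepA] at this
  rw [this]
  have hkeys0 : ([] : List String) = (PySem.Dict.empty : PySem.Dict String (List (Int × Int))).keys := rfl
  rw [hkeys0, pv_main]
  dsimp only
  rw [pv_items]
  simp
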